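-- pv_equiv track=rewrite | github.com/ClaudioAyma/keyboard_shortcuts | app.py | get_key_text
-- ===== SOURCE A (Python) =====
-- def get_key_text(item):
--     list_item = item.strip('\n').split('\n')
--     key = list_item[0]
--     _text = list_item[1:]
--     text = ''
--     for line in _text:
--         text += line + '\n'
--     return [key, text]
-- ===== SOURCE B (Python) =====
-- def get_key_text(item):
--     s = item.strip('\n')
--     i = s.find('\n')
--     if i == -1:
--         return [s, '']
--     return [s[:i], s[i + 1:] + '\n']
-- ===== Notes on version B (the rewrite author's own statement) =====
-- stated objective: simpler
-- what changed: B never splits the string into lines: it strips, locates the first newline with find, and returns the two slices around it (with '\n' re-appended to the remainder), replacing A's split-into-all-lines plus re-join accumulation loop.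
import Mathlib
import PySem

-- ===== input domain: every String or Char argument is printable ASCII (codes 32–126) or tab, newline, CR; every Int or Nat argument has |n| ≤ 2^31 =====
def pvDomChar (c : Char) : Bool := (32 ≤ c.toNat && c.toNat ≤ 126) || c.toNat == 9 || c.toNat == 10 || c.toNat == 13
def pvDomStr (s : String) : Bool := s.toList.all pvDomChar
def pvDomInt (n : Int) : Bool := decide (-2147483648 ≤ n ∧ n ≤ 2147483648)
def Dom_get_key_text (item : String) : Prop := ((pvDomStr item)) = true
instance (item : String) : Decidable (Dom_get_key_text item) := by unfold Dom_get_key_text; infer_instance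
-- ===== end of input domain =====

-- B replaces A's split-into-all-lines + re-join accumulation loop by a find of the first
-- newline and two slices around it (objective: simpler).


-- ===== PORT A =====
def get_key_text (item : String) : List String :=
  let list_item := (PySem.Str.split? (PySem.Str.stripChars item "\n") "\n").getD []
  let key := PySem.List.pyGetD list_item 0 ""
  let _text := PySem.List.slice list_item (some 1) none
  let text := _text.foldl (fun acc line => acc ++ (line ++ "\n")) ""
  [key, text]

-- ===== PORT B =====
def get_key_text_alt (item : String) : List String :=
  let s := PySem.Str.stripChars item "\n"
  let i := PySem.Str.find s "\n"
  if i = -1 then [s, ""]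
  else [PySem.Str.slice s none (some i), PySem.Str.slice s (some (i + 1)) none ++ "\n"]

-- ===== PRECONDITION & SPEC =====
def Spec_get_key_text (item : String) (out : List String) : Prop := out = get_key_text_alt item
instance (item : String) (out : List String) : Decidable (Spec_get_key_text item out) := by unfold Spec_get_key_text; infer_instance

-- ===== CLAIM (what is proved, stated in full; the proofs are below) =====
def Claim_equal_get_key_text : Prop := ∀ (item : String), Dom_get_key_text item → Spec_get_key_text item (get_key_text item)

-- ===== LEMMAS AND PROOFS =====

-- reference single-character splitter (proof helper only)
def pvSplitc (c : Char) : List Char → List (List Char)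
  | [] => [[]]
  | x :: xs => if x = c then [] :: pvSplitc c xs else (pvSplitc c xs).modifyHead (x :: ·)

theorem pvSplitc_ne_nil (c : Char) (l : List Char) : pvSplitc c l ≠ [] := by
  induction l with
  | nil => simp [pvSplitc]
  | cons x xs ih =>
    simp only [pvSplitc]
    split
    · simp
    · cases h : pvSplitc c xs with
      | nil => exact absurd h ih
      | cons p ps => simp

theorem pvSplitc_go (c : Char) (fuel : Nat) :
    ∀ (l cur : List Char) (acc : List (List Char)), l.length ≤ fuel →
    PySem.Chars.splitOn.go [c] fuel l cur acc =
      acc.reverse ++ (pvSplitc c l).modifyHead (cur.reverse ++ ·) := by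
  induction fuel with
  | zero =>
    intro l cur acc h
    have : l = [] := List.eq_nil_of_length_eq_zero (Nat.le_zero.mp h)
    subst this
    rw [PySem.Chars.splitOn.go]
    simp [pvSplitc]
  | succ fuel ih =>
    intro l cur acc h
    cases l with
    | nil =>
      rw [PySem.Chars.splitOn.go]
      simp [pvSplitc]
      all_goals omega
    | cons x rest =>
      rw [PySem.Chars.splitOn.go]
      simp only [List.isPrefixOf, List.length_cons] at *
      by_cases hx : c = x
      · subst hx
        simp only [beq_self_eq_true, Bool.true_and, if_pos, List.length_nil,
          Nat.zero_add, List.drop_succ_cons, List.drop_zero]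
        rw [ih rest [] (cur.reverse :: acc) (by omega)]
        simp only [pvSplitc, List.reverse_nil, List.nil_append, List.reverse_cons,
          List.append_assoc, List.singleton_append]
        cases hps : pvSplitc c rest with
        | nil => exact absurd hps (pvSplitc_ne_nil c rest)
        | cons p ps => simp
      · have hbx : (c == x) = false := by simp [hx]
        simp only [hbx, Bool.false_and, if_neg Bool.false_ne_true]
        rw [ih rest (x :: cur) acc (by omega)]
        have hne : ¬ (x = c) := fun hh => hx hh.symm
        simp only [pvSplitc, if_neg hne]
        cases hps : pvSplitc c rest with
        | nil => exact absurd hps (pvSplitc_ne_nil c rest)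
        | cons p ps => simp

theorem pvSplitc_splitOn (c : Char) (l : List Char) :
    PySem.Chars.splitOn l [c] = pvSplitc c l := by
  unfold PySem.Chars.splitOn
  rw [pvSplitc_go c (l.length + 1) l [] [] (by omega)]
  cases h : pvSplitc c l with
  | nil => exact absurd h (pvSplitc_ne_nil c l)
  | cons p ps => simp

theorem pvSplitc_takeDrop (c : Char) (l : List Char) :
    pvSplitc c l = l.takeWhile (fun a => a ≠ c) ::
      (match l.dropWhile (fun a => a ≠ c) with
        | [] => []
        | _ :: r => pvSplitc c r) := by
  induction l with
  | nil => simp [pvSplitc]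
  | cons x xs ih =>
    by_cases hx : x = c
    · subst hx
      simp [pvSplitc, List.takeWhile, List.dropWhile]
    · simp only [pvSplitc, if_neg hx, List.takeWhile, List.dropWhile]
      have hb : (decide ¬ x = c) = true := by simp [hx]
      rw [ih]
      simp [hb]

theorem pvSplitc_flatMap (c : Char) (l : List Char) :
    (pvSplitc c l).flatMap (fun p => p ++ [c]) = l ++ [c] := by
  induction l with
  | nil => simp [pvSplitc]
  | cons x xs ih =>
    by_cases hx : x = c
    · subst hx
      simp only [pvSplitc]
      simp [ih]
    · simp only [pvSplitc, if_neg hx]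
      cases hps : pvSplitc c xs with
      | nil => exact absurd hps (pvSplitc_ne_nil c xs)
      | cons p ps =>
        rw [hps] at ih
        simp only [List.modifyHead, List.flatMap_cons] at *
        simp only [List.cons_append] at *
        simpa using congrArg (x :: ·) ih

-- A's accumulation loop over strings, read through toList
theorem pvFold_toList (ps : List (List Char)) (a : String) :
    ((ps.map String.ofList).foldl (fun acc line => acc ++ (line ++ "\n")) a).toList
      = a.toList ++ ps.flatMap (fun p => p ++ ['\n']) := by
  induction ps generalizing a with
  | nil => simp
  | cons p rest ih =>
    simp only [List.map_cons, List.foldl_cons, List.flatMap_cons]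
    rw [ih]
    simp [String.toList_append, String.toList_ofList,
      show ("\n" : String).toList = ['\n'] from rfl, List.append_assoc]

-- B's find of a single character lands at the takeWhile boundary
theorem pvFind_char (c : Char) (l : List Char) :
    PySem.Chars.find l [c] =
      (match l.dropWhile (fun a => a ≠ c) with
        | [] => -1
        | _ :: _ => ((l.takeWhile (fun a => a ≠ c)).length : Int)) := by
  cases hd : l.dropWhile (fun a => a ≠ c) with
  | nil =>
    rw [PySem.Chars.find_eq_neg_one_iff]
    intro hin
    have hc : c ∈ l := hin.subset (by simp)
    rw [← List.takeWhile_append_dropWhile (p := fun a => a ≠ c) (l := l), hd] at hc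
    simp only [List.append_nil] at hc
    have := List.mem_takeWhile_imp hc
    simp at this
  | cons x r =>
    have hx : x = c := by
      have hne : l.dropWhile (fun a => a ≠ c) ≠ [] := by
        intro h0; rw [h0] at hd; exact absurd hd (by simp)
      have := List.head_dropWhile_not (fun a => a ≠ c) hne
      simp only [hd, List.head_cons] at this
      simpa using this
    subst hx
    set t := l.takeWhile (fun a => a ≠ x) with ht
    have hsplit : l = t ++ x :: r := by
      conv_lhs => rw [← List.takeWhile_append_dropWhile (p := fun a => a ≠ x) (l := l)]
      rw [hd]
    have hin : [x] <:+: l := ⟨t, r, by simp [hsplit]⟩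
    have hnn : 0 ≤ PySem.Chars.find l [x] := (PySem.Chars.find_nonneg_iff l [x]).mpr hin
    obtain ⟨hpre, hmin⟩ := PySem.Chars.find_spec hnn
    have hle : (PySem.Chars.find l [x]).toNat ≤ t.length := by
      by_contra hgt
      have hp : [x] <+: l.drop t.length := by
        rw [hsplit, List.drop_left' rfl]
        exact ⟨r, rfl⟩
      exact hmin t.length (by omega) hp
    have hge : ¬ (PySem.Chars.find l [x]).toNat < t.length := by
      intro hlt
      rcases hpre with ⟨q, hq⟩
      have hgetl : l[(PySem.Chars.find l [x]).toNat]? = some x := by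
        have hlen : (PySem.Chars.find l [x]).toNat < l.length := by
          have : t.length ≤ l.length := by
            rw [hsplit]; simp
          omega
        have := congrArg (fun z => z[0]?) hq
        simpa [List.getElem?_drop, List.getElem?_eq_getElem hlen] using this.symm
      generalize hk : (PySem.Chars.find l [x]).toNat = k at hlt hgetl
      have hmem : x ∈ t := by
        have hgt2 : t[k]? = some x := by
          rw [← List.getElem?_append_left (l₂ := x :: r) hlt, ← hsplit]
          exact hgetl
        exact List.mem_of_getElem? hgt2
      have := List.mem_takeWhile_imp hmem
      simp at this
    show PySem.Chars.find l [x] = ((t.length : Nat) : Int)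
    omega

-- ===== VERDICT (by name: the statement is the Claim_ definition above) =====
theorem get_key_text_spec : Claim_equal_get_key_text := by
  intro item _
  show get_key_text item = get_key_text_alt item
  simp only [get_key_text, get_key_text_alt]
  have hsep : ("\n" : String).toList = ['\n'] := rfl
  have hsplit : PySem.Str.split? (PySem.Str.stripChars item "\n") "\n"
      = some ((pvSplitc '\n' (PySem.Str.stripChars item "\n").toList).map String.ofList) := by
    simp [PySem.Str.split?, PySem.Chars.split?, hsep, pvSplitc_splitOn]
  have hfind : PySem.Str.find (PySem.Str.stripChars item "\n") "\n"
      = PySem.Chars.find (PySem.Str.stripChars item "\n").toList ['\n'] := by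
    simp [hsep]
  rw [hsplit, hfind]
  set s := PySem.Str.stripChars item "\n" with hs
  set h := s.toList with hh
  rw [pvFind_char '\n' h, pvSplitc_takeDrop '\n' h]
  cases hd : h.dropWhile (fun a => a ≠ '\n') with
  | nil =>
    have hkey : h.takeWhile (fun a => a ≠ '\n') = h := by
      conv_rhs => rw [← List.takeWhile_append_dropWhile (p := fun a => a ≠ '\n') (l := h)]
      rw [hd, List.append_nil]
    have hofl : String.ofList h = s := String.toList_inj.mp (by simp [hh])
    simp only [Option.getD_some, List.map_cons, List.map_nil,
      PySem.List.pyGetD_zero_cons, PySem.List.slice_from_one, List.tail_cons,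
      List.foldl_nil, hkey, hofl, if_true]
  | cons d r =>
    have hdc : d = '\n' := by
      have hne : h.dropWhile (fun a => a ≠ '\n') ≠ [] := by
        intro h0; rw [h0] at hd; exact absurd hd (by simp)
      have := List.head_dropWhile_not (fun a => a ≠ '\n') hne
      simp only [hd, List.head_cons] at this
      simpa using this
    subst hdc
    set t := h.takeWhile (fun a => a ≠ '\n') with ht
    have hsplith : h = t ++ '\n' :: r := by
      conv_lhs => rw [← List.takeWhile_append_dropWhile (p := fun a => a ≠ '\n') (l := h)]
      rw [hd]
    have hnone : ((t.length : Int) = -1) = False := by simp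
    simp only [Option.getD_some, List.map_cons,
      PySem.List.pyGetD_zero_cons, PySem.List.slice_from_one, List.tail_cons,
      hnone, if_false]
    have hkeys : String.ofList t = PySem.Str.slice s none (some (t.length : Int)) := by
      apply String.toList_inj.mp
      rw [PySem.Str.toList_slice, PySem.Chars.slice_eq_listSlice, ← hh,
        PySem.List.slice_to_natCast, String.toList_ofList]
      rw [hsplith, List.take_left' rfl]
    have htexts : ((pvSplitc '\n' r).map String.ofList).foldl
          (fun acc line => acc ++ (line ++ "\n")) ""
        = PySem.Str.slice s (some ((t.length : Int) + 1)) none ++ "\n" := by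
      apply String.toList_inj.mp
      rw [pvFold_toList (pvSplitc '\n' r) ""]
      rw [pvSplitc_flatMap]
      rw [String.toList_append, PySem.Str.toList_slice, PySem.Chars.slice_eq_listSlice, ← hh]
      rw [show ((t.length : Int) + 1) = ((t.length + 1 : Nat) : Int) by push_cast; ring]
      rw [PySem.List.slice_from_natCast]
      have hdrop : h.drop (t.length + 1) = r := by
        rw [hsplith, show t.length + 1 = (t ++ ['\n']).length by simp,
          show t ++ '\n' :: r = (t ++ ['\n']) ++ r by simp, List.drop_left' rfl]
      rw [hdrop, hsep]
      simp
    rw [hkeys, htexts]
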